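-- pv_equiv track=rewrite | github.com/adnanul-islam-jisun/Competitive-programming | CP/C_Insert_Zero_and_Invert_Prefix.py | solve
-- ===== SOURCE A (Python) =====
-- def solve(a):
--     """
--     Solves the sequence problem.
--
--     Args:
--       a: The sequence of 0s and 1s.
--
--     Returns:
--       A list of integers representing the sequence of operations to be performed.
--     """
--
--     n = len(a)
--     b = [0] * n  # Initialize b with all zeros
--     p = []
--
--     for i in range(n):
--         if a[i] != b[i]:
--             for j in range(i, -1, -1):
--                 b[j] = 1 - b[j]
--             p.append(i)
--
--     if b == a:
--         return p
--     else:
--         return []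
-- ===== SOURCE B (Python) =====
-- def solve(a):
--     # single pass: ops are exactly the indices with a nonzero entry;
--     # feasibility check: each a[j] must equal the parity (0/1) of nonzero
--     # entries in the suffix a[j:], computed right-to-left.
--     p = [i for i, x in enumerate(a) if x != 0]
--     s = 0
--     for x in reversed(a):
--         if x != 0:
--             s = 1 - s
--         if x != s:
--             return []
--     return p
-- ===== Notes on version B (the rewrite author's own statement) =====
-- stated objective: faster
-- what changed: A simulates the flips with an inner prefix-inversion loop (quadratic) and compares the built array; B observes that a flip fires at i exactly when a[i]!=0, so it collects the nonzero indices in one pass and validates feasibility by a single right-to-left suffix-parity scan.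
import Mathlib
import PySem

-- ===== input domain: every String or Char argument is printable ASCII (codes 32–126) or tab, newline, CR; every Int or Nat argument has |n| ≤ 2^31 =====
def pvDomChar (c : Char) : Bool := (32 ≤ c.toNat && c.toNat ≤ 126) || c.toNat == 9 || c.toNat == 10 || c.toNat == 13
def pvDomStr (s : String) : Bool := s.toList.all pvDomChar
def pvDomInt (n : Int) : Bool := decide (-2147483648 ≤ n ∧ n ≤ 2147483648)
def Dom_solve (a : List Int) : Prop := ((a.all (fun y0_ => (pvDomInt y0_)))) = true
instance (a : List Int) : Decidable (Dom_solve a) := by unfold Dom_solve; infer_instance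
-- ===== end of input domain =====

-- B replaces A's quadratic flip simulation by one pass collecting nonzero indices
-- plus a right-to-left suffix-parity feasibility scan (objective: faster, asymptotic).

-- ===== PORT A =====
-- inner loop: for j in range(i, -1, -1): b[j] = 1 - b[j]
def solveFlip (b : List Int) (i : Int) : List Int :=
  (PySem.List.pyRange i (-1) (-1)).foldl
    (fun b j => PySem.List.pySetD b j (1 - PySem.List.pyGetD b j 0)) b

-- body of: for i in range(n): if a[i] != b[i]: flip prefix; p.append(i)
-- (a[i]/b[i] are always in range here, so pyGetD is exact)
def solveStep (a : List Int) (st : List Int × List Int) (i : Int) : List Int × List Int :=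
  if PySem.List.pyGetD a i 0 ≠ PySem.List.pyGetD st.1 i 0 then
    (solveFlip st.1 i, st.2 ++ [i])
  else st

def solve (a : List Int) : List Int :=
  let st := (PySem.List.pyRange 0 (PySem.List.len a) 1).foldl (solveStep a)
              (List.replicate a.length 0, [])
  if st.1 = a then st.2 else []

-- ===== PORT B =====
-- for x in reversed(a): s toggles on nonzero x; fail as soon as x != s
def solveCheck : List Int → Int → Bool
  | [], _ => true
  | x :: rest, s =>
    let s' := if x ≠ 0 then 1 - s else s
    if x ≠ s' then false else solveCheck rest s'

def solve_alt (a : List Int) : List Int :=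
  let p := (PySem.List.enumerate a).filterMap (fun q => if q.2 ≠ 0 then some q.1 else none)
  if solveCheck a.reverse 0 then p else []

-- ===== PRECONDITION & SPEC =====
def Spec_solve (a : List Int) (out : List Int) : Prop := out = solve_alt a
instance (a : List Int) (out : List Int) : Decidable (Spec_solve a out) := by unfold Spec_solve; infer_instance

-- ===== CLAIM (what is proved, stated in full; the proofs are below) =====
def Claim_equal_solve : Prop := ∀ (a : List Int), Dom_solve a → Spec_solve a (solve a)

-- ===== LEMMAS AND PROOFS =====

-- toggle step of the parity scan
def tog (x s : Int) : Int := if x ≠ 0 then 1 - s else s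

-- parity value (0/1 over base s) of the nonzero entries of l
def hfold (l : List Int) (s : Int) : Int := l.foldr tog s

-- A's array b after the first n iterations, as a closed form
def modelB (a : List Int) (n : Nat) : List Int :=
  (List.range a.length).map (fun j => hfold ((a.take n).drop j) 0)

-- A's list p after the first n iterations
def modelP (a : List Int) (n : Nat) : List Int :=
  ((List.range n).filter (fun j => a.getD j 0 ≠ 0)).map (fun (j : Nat) => (j : Int))

theorem hfold_append (u : List Int) (x s : Int) :
    hfold (u ++ [x]) s = hfold u (tog x s) := by
  simp [hfold, List.foldr_append]

theorem hfold_one_sub (u : List Int) (s : Int) :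
    hfold u (1 - s) = 1 - hfold u s := by
  induction u with
  | nil => simp [hfold]
  | cons x u ih =>
    simp only [hfold, List.foldr_cons] at *
    by_cases hx : x = 0 <;> simp [tog, hx, ih] <;> ring

theorem set_map_range {L : Nat} (f : Nat → Int) (i : Nat) (v : Int) :
    ((List.range L).map f).set i v
      = (List.range L).map (fun j => if j = i then v else f j) := by
  apply List.ext_getElem
  · simp
  · intro k h1 h2
    simp only [List.getElem_set, List.getElem_map, List.getElem_range]
    simp only [List.length_set, List.length_map, List.length_range] at h1
    by_cases hk : i = k <;> simp [hk]
    omega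

theorem getD_map_range' {L : Nat} (f : Nat → Int) (i : Nat) (hi : i < L) (d : Int) :
    ((List.range L).map f).getD i d = f i := by
  rw [List.getD_eq_getElem?_getD]
  simp [hi]

theorem flip_map {L : Nat} (i : Nat) (hi : i < L) (f : Nat → Int) :
    solveFlip ((List.range L).map f) (i : Int)
      = (List.range L).map (fun j => if j ≤ i then 1 - f j else f j) := by
  induction i generalizing f with
  | zero =>
    rw [solveFlip, PySem.List.pyRange_neg_one_cons (by norm_num),
        PySem.List.pyRange_neg_one_eq_nil (by norm_num)]
    simp only [List.foldl_cons, List.foldl_nil]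
    rw [PySem.List.pySetD_natCast, PySem.List.pyGetD_natCast,
        getD_map_range' f 0 hi, set_map_range]
    apply List.map_congr_left
    intro j hj
    by_cases h : j = 0 <;> simp [h]
  | succ i ih =>
    have hcast : ((i + 1 : Nat) : Int) = (i : Int) + 1 := by push_cast; ring
    rw [solveFlip, hcast, PySem.List.pyRange_neg_one_cons (by omega)]
    simp only [List.foldl_cons]
    have hset : PySem.List.pySetD ((List.range L).map f) ((i : Int) + 1)
        (1 - PySem.List.pyGetD ((List.range L).map f) ((i : Int) + 1) 0)
        = (List.range L).map (fun j => if j = i + 1 then 1 - f (i + 1) else f j) := by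
      rw [← hcast, PySem.List.pySetD_natCast, PySem.List.pyGetD_natCast,
          getD_map_range' f (i + 1) hi, set_map_range]
    have hc2 : ((i : Int) + 1 - 1) = ((i : Nat) : Int) := by ring
    rw [hset, hc2]
    have := ih (Nat.lt_of_succ_lt hi) (fun j => if j = i + 1 then 1 - f (i + 1) else f j)
    rw [solveFlip] at this
    rw [this]
    apply List.map_congr_left
    intro j hj
    by_cases h1 : j ≤ i
    · have : j ≠ i + 1 := by omega
      simp [h1, this, Nat.le_succ_of_le h1]
    · by_cases h2 : j = i + 1 <;> simp [h1, h2] <;> omega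

theorem modelB_getD (a : List Int) (n j : Nat) (hj : j < a.length) (d : Int) :
    (modelB a n).getD j d = hfold ((a.take n).drop j) 0 := by
  rw [modelB, getD_map_range' _ j hj]

theorem fold_inv (a : List Int) (n : Nat) (hn : n ≤ a.length) :
    (PySem.List.pyRange 0 (n : Int) 1).foldl (solveStep a)
        (List.replicate a.length 0, []) = (modelB a n, modelP a n) := by
  induction n with
  | zero =>
    rw [PySem.List.pyRange_one_eq_nil (by norm_num)]
    simp only [List.foldl_nil, Prod.mk.injEq]
    constructor
    · apply List.ext_getElem
      · simp [modelB]
      · intro k h1 h2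
        simp [modelB, hfold]
    · simp [modelP]
  | succ n ih =>
    have hn' : n ≤ a.length := Nat.le_of_succ_le hn
    have hlt : n < a.length := hn
    have hcast : ((n + 1 : Nat) : Int) = (n : Int) + 1 := by push_cast; ring
    rw [hcast, PySem.List.pyRange_one_succ_right (by positivity), List.foldl_append,
        ih hn', List.foldl_cons, List.foldl_nil]
    have hb0 : (modelB a n).getD n 0 = 0 := by
      rw [modelB_getD a n n hlt]
      have : (a.take n).drop n = [] := by
        apply List.drop_eq_nil_of_le; simp [hn']
      simp [this, hfold]
    have htake : a.take (n + 1) = a.take n ++ [a[n]] := by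
      rw [List.take_add_one]
      simp [List.getElem?_eq_getElem hlt]
    by_cases ha : a.getD n 0 = 0
    · -- no operation at index n
      have ha2 : a[n]?.getD 0 = 0 := by rwa [List.getD_eq_getElem?_getD] at ha
      rw [solveStep]
      simp only [PySem.List.pyGetD_natCast, hb0]
      rw [if_neg (by simpa using ha)]
      simp only [Prod.mk.injEq]
      have hAn : a[n] = 0 := by rwa [List.getD_eq_getElem _ _ hlt] at ha
      constructor
      · apply List.map_congr_left
        intro j hj
        rw [htake]
        by_cases hjn : j ≤ n
        · rw [List.drop_append_of_le_length (by simp [hn'] ; omega), hfold_append]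
          simp [tog, hAn]
        · have h1 : (a.take n).drop j = [] := by
            apply List.drop_eq_nil_of_le; simp; omega
          have h2 : ((a.take n) ++ [a[n]]).drop j = [] := by
            apply List.drop_eq_nil_of_le; simp [hn']; omega
          rw [h1, h2]
      · rw [modelP, modelP, List.range_succ, List.filter_append]
        simp [ha2]
    · -- operation fires at index n
      have ha2 : ¬ a[n]?.getD 0 = 0 := by rwa [List.getD_eq_getElem?_getD] at ha
      rw [solveStep]
      simp only [PySem.List.pyGetD_natCast, hb0]
      rw [if_pos (by simpa using ha)]
      simp only [Prod.mk.injEq]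
      have hAn : a[n] ≠ 0 := by rwa [List.getD_eq_getElem _ _ hlt] at ha
      constructor
      · rw [modelB, flip_map n hlt]
        apply List.map_congr_left
        intro j hj
        simp only [List.mem_range] at hj
        rw [htake]
        by_cases hjn : j ≤ n
        · rw [List.drop_append_of_le_length (by simp [hn']; omega), hfold_append]
          have : tog a[n] 0 = 1 - 0 := by simp [tog, hAn]
          rw [this, hfold_one_sub]
          simp [hjn]
        · have h1 : (a.take n).drop j = [] := by
            apply List.drop_eq_nil_of_le; simp; omega
          have h2 : ((a.take n) ++ [a[n]]).drop j = [] := by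
            apply List.drop_eq_nil_of_le; simp [hn']; omega
          rw [if_neg hjn, h1, h2]
      · rw [modelP, modelP, List.range_succ, List.filter_append]
        simp [ha2]

theorem map_filter_eq_filterMap (p : Nat → Bool) (c : Nat → Int) (l : List Nat) :
    (l.filter p).map c = l.filterMap (fun j => if p j then some (c j) else none) := by
  induction l with
  | nil => rfl
  | cons x l ih => by_cases h : p x <;> simp [List.filter_cons, h, ih]

-- B's index list equals A's
theorem idx_eq (a : List Int) :
    modelP a a.length
      = (PySem.List.enumerate a).filterMap (fun q => if q.2 ≠ 0 then some q.1 else none) := by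
  rw [PySem.List.enumerate_eq_map_pyRange a 0, List.filterMap_map, PySem.List.len_eq,
      PySem.List.pyRange_zero_nat, List.filterMap_map, modelP, map_filter_eq_filterMap]
  apply List.filterMap_congr
  intro j hj
  simp only [Function.comp, PySem.List.pyGetD_natCast]
  by_cases h : a.getD j 0 = 0 <;> simp [h]

-- characterisation of B's right-to-left scan
theorem check_iff (a : List Int) (s : Int) :
    solveCheck a.reverse s = true ↔
      ∀ j, (h : j < a.length) → a[j] = hfold (a.drop j) s := by
  induction a using List.reverseRecOn generalizing s with
  | nil => simp [solveCheck]
  | append_singleton a x ih =>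
    have hrev : (a ++ [x]).reverse = x :: a.reverse := by simp
    have hstep : ∀ j (hj : j < a.length),
        ((a ++ [x])[j]'(by simp; omega) = hfold ((a ++ [x]).drop j) s
          ↔ a[j] = hfold (a.drop j) (tog x s)) := by
      intro j hj
      rw [List.getElem_append_left hj,
          List.drop_append_of_le_length (le_of_lt hj), hfold_append]
    have hlastval : ((a ++ [x])[a.length]'(by simp)) = x := by
      rw [List.getElem_append_right (le_refl _)]
      simp
    have hlastdrop : (a ++ [x]).drop a.length = [x] := by
      rw [List.drop_append_of_le_length (le_refl _), List.drop_length, List.nil_append]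
    rw [hrev, solveCheck]
    show (if x ≠ tog x s then false else solveCheck a.reverse (tog x s)) = true
      ↔ ∀ j, (h : j < (a ++ [x]).length) → (a ++ [x])[j] = hfold ((a ++ [x]).drop j) s
    by_cases hxe : x = tog x s
    · rw [if_neg (by simpa using hxe), ih (tog x s)]
      constructor
      · intro h j hj
        simp only [List.length_append, List.length_cons, List.length_nil] at hj
        by_cases hjl : j < a.length
        · exact (hstep j hjl).mpr (h j hjl)
        · have hje : j = a.length := by omega
          subst hje
          rw [hlastval, hlastdrop]
          exact hxe
      · intro h j hj
        exact (hstep j hj).mp (h j (by simp; omega))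
    · rw [if_pos (by simpa using hxe)]
      simp only [Bool.false_eq_true, false_iff, not_forall]
      refine ⟨a.length, by simp, ?_⟩
      rw [hlastval, hlastdrop]
      exact fun hh => hxe hh
    
-- the two feasibility tests agree
theorem cond_iff (a : List Int) :
    (modelB a a.length = a) ↔ solveCheck a.reverse 0 = true := by
  rw [check_iff]
  constructor
  · intro h j hj
    have := congrArg (fun l => l.getD j 0) h
    simp only at this
    rw [modelB_getD a a.length j hj, List.take_length] at this
    rw [List.getD_eq_getElem _ _ hj] at this
    exact this.symm
  · intro h
    apply List.ext_getElem
    · simp [modelB]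
    · intro k h1 h2
      simp only [modelB, List.length_map, List.length_range] at h1
      have := h k h1
      simp only [modelB, List.getElem_map, List.getElem_range, List.take_length]
      exact this.symm

-- ===== VERDICT (by name: the statement is the Claim_ definition above) =====
theorem solve_spec : Claim_equal_solve := by
  intro a _
  unfold Spec_solve solve solve_alt
  rw [PySem.List.len_eq, fold_inv a a.length (le_refl _)]
  simp only
  rw [idx_eq a]
  by_cases h : solveCheck a.reverse 0 = true
  · rw [if_pos ((cond_iff a).mpr h), if_pos h]
  · rw [if_neg (fun hc => h ((cond_iff a).mp hc)), if_neg h]
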